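-- pv_equiv track=rewrite | github.com/Vincannes/StocksAnalyzer | old/analyse_entreprise.py | croissance
-- ===== SOURCE A (Python) =====
-- def croissance(ls_check):
--     ls_croi = []
--     el_prec = ls_check[0]
--     for element in ls_check:
--         if el_prec < element:
--             ls_croi.append(True)
--         else:
--             ls_croi.append(False)
--         el_prec = element
--     decroi = ls_croi.count(False)
--     croi = ls_croi.count(True)
--     return croi, decroi
-- ===== SOURCE B (Python) =====
-- def croissance(ls_check):
--     # Partition the list into maximal strictly increasing runs by skipping
--     # ahead over each run: every run start corresponds to a non-increasing
--     # step (the first element included), every other element to an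
--     # increasing step, so (croi, decroi) = (n - runs, runs).
--     n = len(ls_check)
--     runs = 0
--     i = 0
--     while i < n:
--         runs += 1
--         i += 1
--         while i < n and ls_check[i - 1] < ls_check[i]:
--             i += 1
--     return n - runs, runs
-- ===== Notes on version B (the rewrite author's own statement) =====
-- stated objective: alternative
-- what changed: B partitions the list into maximal strictly increasing runs with a nested skip loop and returns (n - runs, runs), instead of A's boolean step list built element-by-element and counted twice with .count; Pre_ excludes only the empty list, on which A raises IndexError.
import Mathlib
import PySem

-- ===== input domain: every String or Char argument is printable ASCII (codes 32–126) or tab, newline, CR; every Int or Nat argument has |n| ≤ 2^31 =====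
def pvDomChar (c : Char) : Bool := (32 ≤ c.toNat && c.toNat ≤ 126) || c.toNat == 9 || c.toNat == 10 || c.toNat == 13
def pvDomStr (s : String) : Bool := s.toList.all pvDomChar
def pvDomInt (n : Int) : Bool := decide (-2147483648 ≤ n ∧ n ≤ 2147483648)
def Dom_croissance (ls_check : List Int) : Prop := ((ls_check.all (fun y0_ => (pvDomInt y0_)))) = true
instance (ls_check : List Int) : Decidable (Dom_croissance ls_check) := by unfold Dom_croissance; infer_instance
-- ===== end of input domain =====

-- B counts maximal strictly increasing runs (skipping over each run) instead of
-- building A's boolean step list and counting it twice (objective: alternative).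

-- ===== PORT A =====
-- ls_check[0] raises IndexError on []; outside Pre_ the port takes the none branch.
def croissance (ls_check : List Int) : Int × Int :=
  match PySem.List.pyGet? ls_check 0 with
  | none => (0, 0)
  | some el_prec0 =>
    let st := ls_check.foldl
      (fun (s : List Bool × Int) element =>
        (if s.2 < element then s.1 ++ [true] else s.1 ++ [false], element))
      (([] : List Bool), el_prec0)
    let decroi : Int := (PySem.List.count st.1 false : Int)
    let croi : Int := (PySem.List.count st.1 true : Int)
    (croi, decroi)

-- ===== PORT B =====
-- inner while loop of Source B: skip the strictly increasing continuation of the current run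
def pvSkipRun : Int → List Int → List Int
  | p, y :: ys => if p < y then pvSkipRun y ys else y :: ys
  | _, [] => []

theorem pvSkipRun_length_le : ∀ (ys : List Int) (p : Int), (pvSkipRun p ys).length ≤ ys.length := by
  intro ys
  induction ys with
  | nil => intro p; simp [pvSkipRun]
  | cons y ys ih =>
    intro p
    simp only [pvSkipRun]
    by_cases h : p < y
    · rw [if_pos h]; exact le_trans (ih y) (by simp)
    · rw [if_neg h]

-- outer while loop of Source B: one iteration per maximal strictly increasing run
def pvRuns : List Int → Nat
  | [] => 0
  | x :: xs => 1 + pvRuns (pvSkipRun x xs)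
termination_by xs => xs.length
decreasing_by simpa using Nat.lt_succ_of_le (pvSkipRun_length_le xs x)

def croissance_alt (ls_check : List Int) : Int × Int :=
  let runs : Int := (pvRuns ls_check : Int)
  ((ls_check.length : Int) - runs, runs)

-- ===== PRECONDITION & SPEC =====
-- Pre_ excludes only the empty list, on which A raises IndexError on its first subscript.
def Pre_croissance (ls_check : List Int) : Prop := ls_check ≠ []
instance (ls_check : List Int) : Decidable (Pre_croissance ls_check) := by unfold Pre_croissance; infer_instance
def pvWitness_croissance : List Int := [3, 1, 2]

def Spec_croissance (ls_check : List Int) (out : Int × Int) : Prop := out = croissance_alt ls_check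
instance (ls_check : List Int) (out : Int × Int) : Decidable (Spec_croissance ls_check out) := by unfold Spec_croissance; infer_instance

-- ===== CLAIM (what is proved, stated in full; the proofs are below) =====
def Claim_equal_croissance : Prop := ∀ (ls_check : List Int), Dom_croissance ls_check → Pre_croissance ls_check → Spec_croissance ls_check (croissance ls_check)

-- ===== LEMMAS AND PROOFS =====

-- the sequence of booleans A appends while scanning ys with previous element p
def pvRun : Int → List Int → List Bool
  | _, [] => []
  | p, y :: ys => decide (p < y) :: pvRun y ys

theorem pvFoldA (ys : List Int) : ∀ (bs : List Bool) (p : Int),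
    (ys.foldl
      (fun (s : List Bool × Int) element =>
        (if s.2 < element then s.1 ++ [true] else s.1 ++ [false], element))
      (bs, p)).1 = bs ++ pvRun p ys := by
  induction ys with
  | nil => intro bs p; simp [pvRun]
  | cons y ys ih =>
    intro bs p
    simp only [List.foldl_cons, pvRun]
    by_cases h : p < y
    · rw [if_pos h, ih]; simp [h]
    · rw [if_neg h, ih]; simp [h]

theorem pvRunCount (ys : List Int) : ∀ (p : Int),
    (pvRun p ys).count true + (pvRun p ys).count false = ys.length := by
  induction ys with
  | nil => intro p; simp [pvRun]
  | cons y ys ih =>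
    intro p
    simp only [pvRun, List.count_cons, List.length_cons]
    have h2 := ih y
    by_cases h : p < y <;> simp [h] <;> omega

-- the number of False steps A records while scanning xs with previous p equals the
-- number of runs B still counts after skipping the run p is in
theorem pvRunsFalse (xs : List Int) : ∀ (p : Int),
    (pvRun p xs).count false = pvRuns (pvSkipRun p xs) := by
  induction xs with
  | nil => intro p; simp [pvRun, pvSkipRun, pvRuns]
  | cons y ys ih =>
    intro p
    simp only [pvRun, List.count_cons, pvSkipRun]
    by_cases h : p < y
    · simp [h, ih y]
    · simp only [if_neg h, pvRuns]
      have := ih y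
      simp [h] at this ⊢
      omega

-- ===== VERDICT (by name: the statement is the Claim_ definition above) =====
theorem croissance_spec : Claim_equal_croissance := by
  intro ls_check _ hpre
  unfold Spec_croissance croissance croissance_alt
  match ls_check with
  | [] => exact absurd rfl hpre
  | x :: xs =>
    have hget : PySem.List.pyGet? (x :: xs) (0 : Int) = some x := by
      simp [PySem.List.pyGet?, PySem.List.pyIdx?]
    rw [hget]
    simp only [pvFoldA (x :: xs)]
    have hfirst : pvRun x (x :: xs) = false :: pvRun x xs := by simp [pvRun]
    rw [hfirst]
    have hruns : pvRuns (x :: xs) = 1 + pvRuns (pvSkipRun x xs) := by simp [pvRuns]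
    have hfl := pvRunsFalse xs x
    have hc := pvRunCount xs x
    simp only [PySem.List.count, List.nil_append, List.count_cons, List.length_cons,
      Prod.mk.injEq, hruns]
    constructor <;> push_cast <;> simp <;> omega
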